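-- pv_equiv track=rewrite | github.com/pc5401/my_BOJ | 백준/Silver/24362. МАГАЗИН/МАГАЗИН.py | solve
-- ===== SOURCE A (Python) =====
-- def solve(n: int, k: int, cart: list[int]) -> int:
--     result = 0
--     cart.sort(reverse=True)
--
--     for i, price in enumerate(cart):
--         if i % k == k-1:
--             continue
--         result += price
--
--     return result
-- ===== SOURCE B (Python) =====
-- def solve(n: int, k: int, cart: list[int]) -> int:
--     cart.sort(reverse=True)
--     if k < 1:
--         # the "every k-th item is free" rule never applies when k < 1
--         return sum(cart)
--     total = 0
--     for start in range(0, len(cart), k):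
--         total += sum(cart[start:start + k - 1])
--     return total
-- ===== Notes on version B (the rewrite author's own statement) =====
-- stated objective: alternative
-- what changed: B replaces A's single enumerate loop with the i % k == k-1 skip test by a chunked traversal: it walks the sorted cart in strides of k (range(0, n, k)) and adds the slice of the first k-1 items of each chunk, with no per-item modulo test; same O(n log n) cost dominated by the sort.
import Mathlib
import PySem

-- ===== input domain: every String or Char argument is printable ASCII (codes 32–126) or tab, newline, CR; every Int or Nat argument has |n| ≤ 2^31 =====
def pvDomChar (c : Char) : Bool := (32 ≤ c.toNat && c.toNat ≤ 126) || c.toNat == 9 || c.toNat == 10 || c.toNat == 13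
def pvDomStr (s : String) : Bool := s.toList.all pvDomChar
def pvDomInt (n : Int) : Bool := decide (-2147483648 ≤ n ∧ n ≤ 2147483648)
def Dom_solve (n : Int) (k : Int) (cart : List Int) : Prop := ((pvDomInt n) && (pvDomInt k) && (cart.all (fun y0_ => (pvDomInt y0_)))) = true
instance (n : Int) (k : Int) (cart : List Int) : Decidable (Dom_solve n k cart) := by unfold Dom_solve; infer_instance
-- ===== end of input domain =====

-- B replaces A's index-modulo skip loop by chunking the sorted cart into groups of k and
-- paying only the first k-1 items of each group (alternative decomposition, same cost).
-- Both A and B sort the caller's list in place; the equivalence proved here is about the return value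
-- (the in-place sort is identical in A and B).

-- ===== PORT A =====
-- A: sort descending, loop over enumerate skipping indices with i % k == k-1.
def solve (n : Int) (k : Int) (cart : List Int) : Int :=
  let s := PySem.List.sorted cart (fun x => x) true
  (PySem.List.enumerate s 0).foldl
    (fun result ip => if PySem.Int.mod ip.1 k = k - 1 then result else result + ip.2) 0

-- ===== PORT B =====
-- B's loop 'for start in range(0, len(cart), k): total += sum(cart[start:start+k-1])' is
-- ported as structural recursion on the remaining list: each step pays the slice of the
-- first k-1 = k' items of the current chunk and recurses past the whole chunk of k items.
def payChunks (k' : Nat) : List Int → Int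
  | [] => 0
  | x :: xs => ((x :: xs).take k').sum + payChunks k' (xs.drop k')
termination_by l => l.length
decreasing_by simp

def solve_alt (n : Int) (k : Int) (cart : List Int) : Int :=
  let s := PySem.List.sorted cart (fun x => x) true
  if k < 1 then s.sum
  else payChunks (k - 1).toNat s

-- ===== PRECONDITION & SPEC =====
-- Pre_ excludes exactly k = 0 with a non-empty cart, where Python A raises ZeroDivisionError (i % 0).
def Pre_solve (n : Int) (k : Int) (cart : List Int) : Prop := k ≠ 0 ∨ cart = []
instance (n : Int) (k : Int) (cart : List Int) : Decidable (Pre_solve n k cart) := by unfold Pre_solve; infer_instance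
def pvWitness_solve : Int × Int × List Int := (3, 2, [5, 1, 3])
def Spec_solve (n : Int) (k : Int) (cart : List Int) (out : Int) : Prop := out = solve_alt n k cart
instance (n : Int) (k : Int) (cart : List Int) (out : Int) : Decidable (Spec_solve n k cart out) := by unfold Spec_solve; infer_instance

-- ===== CLAIM (what is proved, stated in full; the proofs are below) =====
def Claim_equal_solve : Prop := ∀ (n : Int) (k : Int) (cart : List Int), Dom_solve n k cart → Pre_solve n k cart → Spec_solve n k cart (solve n k cart)

-- ===== LEMMAS AND PROOFS =====
-- paid-sum of A's loop, as a structural recursion over the prices with running index a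
def payA (k : Int) (a : Int) : List Int → Int
  | [] => 0
  | p :: l => (if PySem.Int.mod a k = k - 1 then 0 else p) + payA k (a + 1) l

theorem foldA_eq_payA (k : Int) (s : List Int) : ∀ (a r : Int),
    (PySem.List.enumerate s a).foldl
      (fun result ip => if PySem.Int.mod ip.1 k = k - 1 then result else result + ip.2) r
    = r + payA k a s := by
  induction s with
  | nil => intro a r; simp [PySem.List.enumerate_nil, payA]
  | cons p l ih =>
    intro a r
    rw [PySem.List.enumerate_cons, List.foldl_cons, ih]
    simp only [payA]
    by_cases h : PySem.Int.mod a k = k - 1 <;> simp [h] <;> ring_nf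

theorem payA_neg (k : Int) (hk : k < 0) (s : List Int) : ∀ a, payA k a s = s.sum := by
  induction s with
  | nil => intro a; simp [payA]
  | cons p l ih =>
    intro a
    have hb := PySem.Int.mod_neg_bounds a hk
    have h : ¬ PySem.Int.mod a k = k - 1 := by omega
    simp [payA, h, ih]

theorem payA_shift (k : Int) (hk : 0 < k) (s : List Int) : ∀ a, payA k (a + k) s = payA k a s := by
  induction s with
  | nil => intro a; simp [payA]
  | cons p l ih =>
    intro a
    have hm : PySem.Int.mod (a + k) k = PySem.Int.mod a k := by
      rw [PySem.Int.mod_eq_emod_of_pos hk, PySem.Int.mod_eq_emod_of_pos hk,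
        Int.add_emod_right]
    have : a + k + 1 = a + 1 + k := by ring
    simp only [payA, hm, this, ih]

theorem payChunks_nil (k' : Nat) : payChunks k' [] = 0 := by rw [payChunks]

theorem payChunks_unfold (k' : Nat) (s : List Int) :
    payChunks k' s = (s.take k').sum + payChunks k' (s.drop (k' + 1)) := by
  cases s with
  | nil => simp [payChunks_nil]
  | cons y ys =>
    rw [payChunks]
    simp [List.drop_succ_cons]

theorem payA_eq_chunks (k' : Nat) (s : List Int) : ∀ (j : Nat), j ≤ k' →
    payA ((k' : Int) + 1) ((k' : Int) - (j : Int)) s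
      = (s.take j).sum + payChunks k' (s.drop (j + 1)) := by
  induction s with
  | nil => intro j _; simp [payA, payChunks_nil]
  | cons x xs ih =>
    intro j hj
    have hmod : PySem.Int.mod ((k' : Int) - (j : Int)) ((k' : Int) + 1) = (k' : Int) - (j : Int) := by
      rw [PySem.Int.mod_eq_emod_of_pos (by omega)]
      exact Int.emod_eq_of_lt (by omega) (by omega)
    cases j with
    | zero =>
      have hcond : PySem.Int.mod ((k' : Int) - (0 : Nat)) ((k' : Int) + 1) = (k' : Int) + 1 - 1 := by
        rw [hmod]; simp
      have hshift : payA ((k' : Int) + 1) ((k' : Int) - (0 : Nat) + 1) xs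
          = payA ((k' : Int) + 1) ((k' : Int) - (k' : Int)) xs := by
        have h1 : (k' : Int) - (0 : Nat) + 1 = 0 + ((k' : Int) + 1) := by simp
        have h2 : (k' : Int) - (k' : Int) = 0 := by ring
        rw [h1, h2, payA_shift _ (by omega)]
      simp only [payA, hcond, hshift, ih k' le_rfl, zero_add]
      rw [List.drop_succ_cons, List.drop_zero, payChunks_unfold k' xs]
      simp
    | succ j'' =>
      have hcond : ¬ PySem.Int.mod ((k' : Int) - ((j'' + 1 : Nat) : Int)) ((k' : Int) + 1)
          = (k' : Int) + 1 - 1 := by rw [hmod]; push_cast; omega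
      have harg : (k' : Int) - ((j'' + 1 : Nat) : Int) + 1 = (k' : Int) - (j'' : Int) := by
        push_cast; ring
      simp only [payA, hcond, harg, ih j'' (by omega)]
      simp [List.take_succ_cons, List.drop_succ_cons]
      ring

-- ===== VERDICT (by name: the statement is the Claim_ definition above) =====
theorem solve_spec : Claim_equal_solve := by
  intro n k cart _ hpre
  simp only [Spec_solve, solve, solve_alt]
  rw [foldA_eq_payA, zero_add]
  by_cases hk : k < 1
  · rw [if_pos hk]
    rcases lt_or_ge k 0 with hneg | hz
    · exact payA_neg k hneg _ 0
    · have hk0 : k = 0 := by omega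
      have hc : cart = [] := hpre.resolve_left (not_not_intro hk0)
      subst hc
      simp [PySem.List.sorted, payA]
  · rw [if_neg hk]
    rw [payChunks_unfold (k - 1).toNat, ← payA_eq_chunks (k - 1).toNat _ (k - 1).toNat le_rfl]
    have h1 : ((k - 1).toNat : Int) + 1 = k := by omega
    have h2 : ((k - 1).toNat : Int) - ((k - 1).toNat : Int) = 0 := by ring
    rw [h1, h2]
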